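-- pv_equiv track=rewrite | github.com/SuvodipDey/BoK | T5/create_data.py | get_word_mapping
-- ===== SOURCE A (Python) =====
-- import collections
--
-- def get_word_mapping(tok):
--     word_ids = tok["word_ids"].copy()
--     mapping = collections.defaultdict(list)
--     current_word_index = -1
--     current_word = None
--     for idx, word_id in enumerate(word_ids):
--         if word_id is not None:
--             if word_id != current_word:
--                 current_word = word_id
--                 current_word_index += 1
--             mapping[current_word_index].append(idx)
--     return mapping
-- ===== SOURCE B (Python) =====
-- import collections
--
-- def get_word_mapping(tok):
--     # Staged pipeline: filter indices and values, compute change flags between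
--     # adjacent values, turn them into group labels by prefix sum, then bucket
--     # each index under its precomputed label.
--     word_ids = tok["word_ids"]
--     idxs = [i for i, w in enumerate(word_ids) if w is not None]
--     vals = [w for w in word_ids if w is not None]
--     changes = [1 if a != b else 0 for a, b in zip(vals[1:], vals)]
--     labels = [0]
--     for c in changes:
--         labels.append(labels[-1] + c)
--     mapping = collections.defaultdict(list)
--     for i, g in zip(idxs, labels):
--         mapping[g].append(i)
--     return mapping
-- ===== Notes on version B (the rewrite author's own statement) =====
-- stated objective: alternative
-- what changed: Replaces A's single-pass state machine (current_word/current_word_index carried across the loop, appending per token) by a staged pipeline: filtered index and value lists, adjacent-difference change flags, prefix-sum group labels, and a final bucketing of each index under its precomputed label.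
import Mathlib
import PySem

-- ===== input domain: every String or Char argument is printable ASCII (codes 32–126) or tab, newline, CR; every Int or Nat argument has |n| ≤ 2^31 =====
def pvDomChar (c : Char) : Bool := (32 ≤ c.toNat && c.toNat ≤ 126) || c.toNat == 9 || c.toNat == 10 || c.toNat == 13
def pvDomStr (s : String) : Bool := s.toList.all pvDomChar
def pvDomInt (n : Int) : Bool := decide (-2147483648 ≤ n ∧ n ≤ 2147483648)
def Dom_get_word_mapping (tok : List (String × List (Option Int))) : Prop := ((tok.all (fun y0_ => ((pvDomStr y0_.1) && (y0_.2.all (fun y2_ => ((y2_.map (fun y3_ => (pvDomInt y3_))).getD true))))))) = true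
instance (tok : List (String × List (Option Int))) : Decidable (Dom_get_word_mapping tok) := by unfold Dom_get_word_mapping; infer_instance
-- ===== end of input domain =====

-- B replaces A's per-token state machine by a staged pipeline — filtered index/value lists,
-- adjacent-difference change flags, prefix-sum group labels, then bucketing by label;
-- objective: alternative decomposition (return value only; neither program mutates its argument).


-- ===== PORT A =====
-- A's loop: state machine over enumerate(word_ids) with (mapping, current_word_index, current_word);
-- mapping[current_word_index].append(idx) on a defaultdict(list) is Dict.modify _ _ [] (· ++ [idx]).
def loopA_gwm : List (Option Int) → Int → PySem.Dict Int (List Int) → Int → Option Int →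
    PySem.Dict Int (List Int)
  | [], _, m, _, _ => m
  | w :: ws, idx, m, cwi, cw =>
    match w with
    | none => loopA_gwm ws (idx + 1) m cwi cw
    | some v =>
      let s := if some v ≠ cw then (some v, cwi + 1) else (cw, cwi)
      loopA_gwm ws (idx + 1) (PySem.Dict.modify m s.2 [] (· ++ [idx])) s.2 s.1

def get_word_mapping (tok : List (String × List (Option Int))) : List (Int × List Int) :=
  match (PySem.Dict.mk tok).get? "word_ids" with
  | none => []  -- tok["word_ids"] raises KeyError; excluded by Pre_
  | some word_ids => (loopA_gwm word_ids 0 PySem.Dict.empty (-1) none).items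

-- ===== PORT B =====
-- idxs = [i for i, w in enumerate(word_ids) if w is not None]
def bIdxs_gwm : List (Option Int) → Int → List Int
  | [], _ => []
  | none :: ws, i => bIdxs_gwm ws (i + 1)
  | some _ :: ws, i => i :: bIdxs_gwm ws (i + 1)

-- vals = [w for w in word_ids if w is not None]
def bVals_gwm : List (Option Int) → List Int
  | [] => []
  | none :: ws => bVals_gwm ws
  | some w :: ws => w :: bVals_gwm ws

-- 1 if a != b else 0
def bChange_gwm (a b : Int) : Int := if a ≠ b then 1 else 0

-- labels = [0]; for c in changes: labels.append(labels[-1] + c)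
def bLabels_gwm : List Int → Int → List Int
  | [], s => [s]
  | c :: cs, s => s :: bLabels_gwm cs (s + c)

-- mapping[g].append(i) on a defaultdict(list)
def bBucket_gwm (m : PySem.Dict Int (List Int)) (p : Int × Int) : PySem.Dict Int (List Int) :=
  PySem.Dict.modify m p.2 [] (· ++ [p.1])

def get_word_mapping_alt (tok : List (String × List (Option Int))) : List (Int × List Int) :=
  match (PySem.Dict.mk tok).get? "word_ids" with
  | none => []  -- tok["word_ids"] raises KeyError; excluded by Pre_
  | some word_ids =>
    let idxs := bIdxs_gwm word_ids 0
    let vals := bVals_gwm word_ids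
    let changes := List.zipWith bChange_gwm (PySem.List.slice vals (some 1) none) vals
    let labels := bLabels_gwm changes 0
    ((idxs.zip labels).foldl bBucket_gwm PySem.Dict.empty).items

-- ===== PRECONDITION & SPEC =====
-- A (and B) raise KeyError when "word_ids" is not a key of tok; nothing else raises.
def Pre_get_word_mapping (tok : List (String × List (Option Int))) : Prop :=
  ((PySem.Dict.mk tok).get? "word_ids").isSome = true
instance (tok : List (String × List (Option Int))) : Decidable (Pre_get_word_mapping tok) := by
  unfold Pre_get_word_mapping; infer_instance

def pvWitness_get_word_mapping : (List (String × List (Option Int))) :=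
  [("word_ids", [some 0, some 0, none, some 1, some 0])]

def Spec_get_word_mapping (tok : List (String × List (Option Int))) (out : List (Int × List Int)) : Prop := out = get_word_mapping_alt tok
instance (tok : List (String × List (Option Int))) (out : List (Int × List Int)) : Decidable (Spec_get_word_mapping tok out) := by unfold Spec_get_word_mapping; infer_instance

-- ===== CLAIM (what is proved, stated in full; the proofs are below) =====
def Claim_equal_get_word_mapping : Prop := ∀ (tok : List (String × List (Option Int))), Dom_get_word_mapping tok → Pre_get_word_mapping tok → Spec_get_word_mapping tok (get_word_mapping tok)

-- ===== LEMMAS AND PROOFS =====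
-- Proof-only normal form: the None-filtered (index, word_id) pairs, their maximal consecutive
-- runs of equal word_id, and the association list those runs produce. Both ports are reduced to it.

def filterPairs_gwm : List (Option Int) → Int → List (Int × Int)
  | [], _ => []
  | none :: ws, i => filterPairs_gwm ws (i + 1)
  | some w :: ws, i => (i, w) :: filterPairs_gwm ws (i + 1)

def groupRuns_gwm : List (Int × Int) → List (List (Int × Int))
  | [] => []
  | (i, w) :: rest =>
      ((i, w) :: rest.takeWhile (fun p => p.2 == w)) ::
        groupRuns_gwm (rest.dropWhile (fun p => p.2 == w))
  termination_by l => l.length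
  decreasing_by simpa using Nat.lt_succ_of_le (List.length_dropWhile_le _ _)

def emitGroups_gwm : List (List (Int × Int)) → Int → List (Int × List Int)
  | [], _ => []
  | g :: gs, counter => (counter + 1, g.map (·.1)) :: emitGroups_gwm gs (counter + 1)

-- abbreviation for A's folding step over the filtered pairs
def stepP_gwm (st : PySem.Dict Int (List Int) × Int × Option Int) (p : Int × Int) :
    PySem.Dict Int (List Int) × Int × Option Int :=
  let s := if some p.2 ≠ st.2.2 then (some p.2, st.2.1 + 1) else (st.2.2, st.2.1)
  (PySem.Dict.modify st.1 s.2 [] (· ++ [p.1]), s.2, s.1)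

-- Skipping None entries: A's loop over word_ids is its loop over the filtered pairs.
theorem loopA_eq_filter (ws : List (Option Int)) : ∀ (i : Int) (m : PySem.Dict Int (List Int))
    (cwi : Int) (cw : Option Int),
    loopA_gwm ws i m cwi cw =
      ((filterPairs_gwm ws i).foldl stepP_gwm (m, cwi, cw)).1 := by
  induction ws with
  | nil => intro i m cwi cw; rfl
  | cons w ws ih =>
    intro i m cwi cw
    cases w with
    | none => simpa [loopA_gwm, filterPairs_gwm] using ih (i + 1) m cwi cw
    | some v =>
      rw [loopA_gwm, filterPairs_gwm, List.foldl_cons]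
      exact ih (i + 1) _ _ _

theorem get_mk_append_last (M : List (Int × List Int)) (c : Int) (cur : List Int)
    (h : ∀ p ∈ M, p.1 ≠ c) :
    (PySem.Dict.mk (M ++ [(c, cur)])).get? c = some cur := by
  induction M with
  | nil => simp [PySem.Dict.get?_mk_cons]
  | cons p M ih =>
    rw [List.cons_append, PySem.Dict.get?_mk_cons]
    have hp := h p (by simp)
    simp only [beq_iff_eq, hp, if_false]
    exact ih (fun q hq => h q (by simp [hq]))

theorem get_mk_none (L : List (Int × List Int)) (k : Int) (h : ∀ p ∈ L, p.1 ≠ k) :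
    (PySem.Dict.mk L).get? k = none := by
  induction L with
  | nil => simp [PySem.Dict.get?]
  | cons p L ih =>
    rw [PySem.Dict.get?_mk_cons]
    have hp := h p (by simp)
    simp only [beq_iff_eq, hp, if_false]
    exact ih (fun q hq => h q (by simp [hq]))

-- modify on a dict whose LAST association has the key: extend that list in place
theorem modify_mk_append_last (M : List (Int × List Int)) (c : Int) (cur : List Int)
    (f : List Int → List Int) (h : ∀ p ∈ M, p.1 ≠ c) :
    PySem.Dict.modify (PySem.Dict.mk (M ++ [(c, cur)])) c [] f =
      PySem.Dict.mk (M ++ [(c, f cur)]) := by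
  have hget : (PySem.Dict.mk (M ++ [(c, cur)])).get? c = some cur := get_mk_append_last M c cur h
  have hgetD : (PySem.Dict.mk (M ++ [(c, cur)])).getD c [] = cur := by
    rw [PySem.Dict.getD_eq_get?_getD, hget]; rfl
  have hcont : (PySem.Dict.mk (M ++ [(c, cur)])).contains c = true := by
    rw [PySem.Dict.contains_eq_isSome_get?, hget]; rfl
  rw [PySem.Dict.modify, hgetD, PySem.Dict.insert, if_pos hcont]
  congr 1
  show (M ++ [(c, cur)]).map _ = M ++ [(c, f cur)]
  rw [List.map_append]
  congr 1
  · exact (List.map_congr_left (fun p hp => by simp [h p hp])).trans (List.map_id _)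
  · simp

-- modify at a fresh key: append the new association at the end
theorem modify_mk_fresh (L : List (Int × List Int)) (k : Int)
    (f : List Int → List Int) (h : ∀ p ∈ L, p.1 ≠ k) :
    PySem.Dict.modify (PySem.Dict.mk L) k [] f = PySem.Dict.mk (L ++ [(k, f [])]) := by
  have hget : (PySem.Dict.mk L).get? k = none := get_mk_none L k h
  have hgetD : (PySem.Dict.mk L).getD k [] = [] := by
    rw [PySem.Dict.getD_eq_get?_getD, hget]; rfl
  have hcont : (PySem.Dict.mk L).contains k = false := by
    rw [PySem.Dict.contains_eq_isSome_get?, hget]; rfl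
  rw [PySem.Dict.modify, hgetD, PySem.Dict.insert, hcont]
  simp

-- A-side invariant: with current group (c, cur) last in the dict and current word w,
-- the rest of the fold extends cur by the indices of the current run and then emits the later runs.
theorem grow_gwm (rest : List (Int × Int)) : ∀ (M : List (Int × List Int)) (cur : List Int)
    (c : Int) (w : Int), (∀ p ∈ M, p.1 < c) →
    (rest.foldl stepP_gwm (PySem.Dict.mk (M ++ [(c, cur)]), c, some w)).1.items =
      M ++ (c, cur ++ (rest.takeWhile (fun p => p.2 == w)).map (·.1)) ::
        emitGroups_gwm (groupRuns_gwm (rest.dropWhile (fun p => p.2 == w))) c := by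
  induction rest with
  | nil => intro M cur c w hM; simp [emitGroups_gwm, groupRuns_gwm]
  | cons q rest ih =>
    intro M cur c w hM
    obtain ⟨j, v⟩ := q
    by_cases hv : v = w
    · subst hv
      rw [List.foldl_cons]
      have hstep : stepP_gwm (PySem.Dict.mk (M ++ [(c, cur)]), c, some v) (j, v) =
          (PySem.Dict.mk (M ++ [(c, cur ++ [j])]), c, some v) := by
        simp only [stepP_gwm]
        rw [if_neg (by simp)]
        exact congrArg (·, c, some v)
          (modify_mk_append_last M c cur _ (fun p hp => ne_of_lt (hM p hp)))
      rw [hstep, ih M (cur ++ [j]) c v hM]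
      simp [List.takeWhile, List.dropWhile]
    · rw [List.foldl_cons]
      have hfresh : ∀ p ∈ M ++ [(c, cur)], p.1 ≠ c + 1 := by
        intro p hp
        rcases List.mem_append.mp hp with h1 | h1
        · have := hM p h1; omega
        · simp only [List.mem_singleton] at h1; subst h1; omega
      have hlt : ∀ p ∈ M ++ [(c, cur)], p.1 < c + 1 := by
        intro p hp
        rcases List.mem_append.mp hp with h1 | h1
        · have := hM p h1; omega
        · simp only [List.mem_singleton] at h1; subst h1; omega
      have hstep : stepP_gwm (PySem.Dict.mk (M ++ [(c, cur)]), c, some w) (j, v) =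
          (PySem.Dict.mk ((M ++ [(c, cur)]) ++ [(c + 1, [j])]), c + 1, some v) := by
        simp only [stepP_gwm]
        rw [if_pos (by simp [hv])]
        exact congrArg (·, c + 1, some v)
          (modify_mk_fresh (M ++ [(c, cur)]) (c + 1) _ hfresh)
      rw [hstep, ih (M ++ [(c, cur)]) [j] (c + 1) v hlt]
      have hbeq : (v == w) = false := by simp [hv]
      have hw : ((j, v) :: rest).takeWhile (fun p => p.2 == w) = [] := by
        simp [List.takeWhile, hbeq]
      have hd : ((j, v) :: rest).dropWhile (fun p => p.2 == w) = (j, v) :: rest := by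
        simp [List.dropWhile, hbeq]
      rw [hw, hd, groupRuns_gwm]
      simp [emitGroups_gwm]

theorem fold_eq_emit (pairs : List (Int × Int)) :
    (pairs.foldl stepP_gwm (PySem.Dict.empty, -1, none)).1.items =
      emitGroups_gwm (groupRuns_gwm pairs) (-1) := by
  cases pairs with
  | nil => simp [emitGroups_gwm, groupRuns_gwm, PySem.Dict.empty]
  | cons q rest =>
    obtain ⟨i, w⟩ := q
    rw [List.foldl_cons]
    have hstep : stepP_gwm (PySem.Dict.empty, -1, none) (i, w) =
        (PySem.Dict.mk ([] ++ [(0, [i])]), 0, some w) := by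
      simp only [stepP_gwm]
      rw [if_pos (by simp)]
      rfl
    rw [hstep, grow_gwm rest [] [i] 0 w (by simp), groupRuns_gwm]
    simp [emitGroups_gwm]

-- ===== B-side lemmas =====

theorem bIdxs_eq_filter (ws : List (Option Int)) : ∀ i,
    bIdxs_gwm ws i = (filterPairs_gwm ws i).map Prod.fst := by
  induction ws with
  | nil => intro i; rfl
  | cons w ws ih =>
    intro i
    cases w <;> simp [bIdxs_gwm, filterPairs_gwm, ih]

theorem bVals_eq_filter (ws : List (Option Int)) : ∀ i,
    bVals_gwm ws = (filterPairs_gwm ws i).map Prod.snd := by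
  induction ws with
  | nil => intro i; rfl
  | cons w ws ih =>
    intro i
    cases w <;> simpa [bVals_gwm, filterPairs_gwm] using ih (i + 1)

-- the label each filtered pair receives, computed run-locally
def labelRest_gwm : List (Int × Int) → Int → Int → List (Int × Int)
  | [], _, _ => []
  | (i, v) :: rest, w, c =>
    if v = w then (i, c) :: labelRest_gwm rest v c
    else (i, c + 1) :: labelRest_gwm rest v (c + 1)

-- zipping the indices with the prefix-sum labels yields exactly the run-local labels
theorem zip_labels_eq (rest : List (Int × Int)) : ∀ (v c i : Int),
    (i :: rest.map Prod.fst).zip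
      (bLabels_gwm (List.zipWith bChange_gwm (rest.map Prod.snd) (v :: rest.map Prod.snd)) c) =
    (i, c) :: labelRest_gwm rest v c := by
  induction rest with
  | nil => intro v c i; rfl
  | cons q rest ih =>
    intro v c i
    obtain ⟨j, u⟩ := q
    by_cases hu : u = v
    · subst hu
      have : bChange_gwm u u = 0 := by simp [bChange_gwm]
      simp only [List.map_cons, List.zipWith_cons_cons, this, bLabels_gwm, List.zip_cons_cons,
        labelRest_gwm]
      rw [show c + 0 = c by ring]
      exact congrArg _ (ih u c j)
    · have : bChange_gwm u v = 1 := by simp [bChange_gwm, hu]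
      simp only [List.map_cons, List.zipWith_cons_cons, this, bLabels_gwm, List.zip_cons_cons,
        labelRest_gwm, if_neg hu]
      exact congrArg _ (ih u (c + 1) j)

-- B-side invariant: bucketing the labelled rest, with current group (c, cur) last in the dict,
-- extends cur by the indices of the current run and then emits the later runs.
theorem growBucket_gwm (rest : List (Int × Int)) : ∀ (M : List (Int × List Int)) (cur : List Int)
    (c : Int) (w : Int), (∀ p ∈ M, p.1 < c) →
    ((labelRest_gwm rest w c).foldl bBucket_gwm (PySem.Dict.mk (M ++ [(c, cur)]))).items =
      M ++ (c, cur ++ (rest.takeWhile (fun p => p.2 == w)).map (·.1)) ::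
        emitGroups_gwm (groupRuns_gwm (rest.dropWhile (fun p => p.2 == w))) c := by
  induction rest with
  | nil => intro M cur c w hM; simp [labelRest_gwm, emitGroups_gwm, groupRuns_gwm]
  | cons q rest ih =>
    intro M cur c w hM
    obtain ⟨j, v⟩ := q
    by_cases hv : v = w
    · subst hv
      rw [labelRest_gwm, if_pos rfl, List.foldl_cons]
      have hstep : bBucket_gwm (PySem.Dict.mk (M ++ [(c, cur)])) (j, c) =
          PySem.Dict.mk (M ++ [(c, cur ++ [j])]) :=
        modify_mk_append_last M c cur _ (fun p hp => ne_of_lt (hM p hp))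
      rw [hstep, ih M (cur ++ [j]) c v hM]
      simp [List.takeWhile, List.dropWhile]
    · rw [labelRest_gwm, if_neg hv, List.foldl_cons]
      have hfresh : ∀ p ∈ M ++ [(c, cur)], p.1 ≠ c + 1 := by
        intro p hp
        rcases List.mem_append.mp hp with h1 | h1
        · have := hM p h1; omega
        · simp only [List.mem_singleton] at h1; subst h1; omega
      have hlt : ∀ p ∈ M ++ [(c, cur)], p.1 < c + 1 := by
        intro p hp
        rcases List.mem_append.mp hp with h1 | h1
        · have := hM p h1; omega
        · simp only [List.mem_singleton] at h1; subst h1; omega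
      have hstep : bBucket_gwm (PySem.Dict.mk (M ++ [(c, cur)])) (j, c + 1) =
          PySem.Dict.mk ((M ++ [(c, cur)]) ++ [(c + 1, [j])]) :=
        modify_mk_fresh (M ++ [(c, cur)]) (c + 1) _ hfresh
      rw [hstep, ih (M ++ [(c, cur)]) [j] (c + 1) v hlt]
      have hbeq : (v == w) = false := by simp [hv]
      have hw : ((j, v) :: rest).takeWhile (fun p => p.2 == w) = [] := by
        simp [List.takeWhile, hbeq]
      have hd : ((j, v) :: rest).dropWhile (fun p => p.2 == w) = (j, v) :: rest := by
        simp [List.dropWhile, hbeq]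
      rw [hw, hd, groupRuns_gwm]
      simp [emitGroups_gwm]

-- B's whole pipeline over the filtered pairs equals the run normal form
theorem bpipe_eq_emit (pairs : List (Int × Int)) :
    (((pairs.map Prod.fst).zip
        (bLabels_gwm (List.zipWith bChange_gwm ((pairs.map Prod.snd).tail) (pairs.map Prod.snd)) 0)).foldl
        bBucket_gwm PySem.Dict.empty).items =
      emitGroups_gwm (groupRuns_gwm pairs) (-1) := by
  cases pairs with
  | nil => simp [bLabels_gwm, emitGroups_gwm, groupRuns_gwm, PySem.Dict.empty]
  | cons q rest =>
    obtain ⟨i, w⟩ := q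
    have hz := zip_labels_eq rest w 0 i
    simp only [List.map_cons, List.tail_cons] at hz ⊢
    rw [hz, List.foldl_cons]
    have hstep : bBucket_gwm PySem.Dict.empty (i, 0) = PySem.Dict.mk ([] ++ [(0, [i])]) := by
      exact modify_mk_fresh [] 0 _ (by simp)
    rw [hstep, growBucket_gwm rest [] [i] 0 w (by simp), groupRuns_gwm]
    simp [emitGroups_gwm]

-- ===== VERDICT (by name: the statement is the Claim_ definition above) =====
theorem get_word_mapping_spec : Claim_equal_get_word_mapping := by
  intro tok _ hpre
  unfold Spec_get_word_mapping get_word_mapping get_word_mapping_alt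
  unfold Pre_get_word_mapping at hpre
  obtain ⟨wids, hw⟩ := Option.isSome_iff_exists.mp hpre
  rw [hw]
  dsimp only
  rw [loopA_eq_filter, fold_eq_emit]
  rw [PySem.List.slice_from_one, bIdxs_eq_filter wids 0, bVals_eq_filter wids 0]
  exact (bpipe_eq_emit (filterPairs_gwm wids 0)).symm
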